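-- pv_equiv track=rewrite | github.com/albertnanda19/Dev-Memory | bot.py | _build_non_ai_standup
-- ===== SOURCE A (Python) =====
-- from typing import Any
--
-- def _build_non_ai_standup(agg: dict[str, Any]) -> str:
--     sections: list[str] = []
--
--     items = agg.get("detailed_changes") or []
--     if not isinstance(items, list):
--         items = []
--
--     by_type: dict[str, list[dict[str, Any]]] = {}
--     for it in items:
--         if not isinstance(it, dict):
--             continue
--         t = str(it.get("type") or "chore")
--         arr = by_type.get(t)
--         if arr is None:
--             arr = []
--             by_type[t] = arr
--         arr.append(it)
--
--     def _take(types: list[str], limit: int) -> list[dict[str, Any]]: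
--         out: list[dict[str, Any]] = []
--         for t in types:
--             out.extend(by_type.get(t) or [])
--         return out[:limit]
--
--     built = _take(["feature", "infra"], 6)
--     improved = _take(["refactor", "performance"], 6)
--     safeguards = _take(["validation", "test", "fix"], 6)
--
--     def _clean_desc(desc: str) -> str:
--         d = desc.strip()
--         low = d.lower()
--         prefixes = ["feat:", "fix:", "refactor:", "test:", "chore:", "perf:", "ci:"]
--         for p in prefixes:
--             if low.startswith(p):
--                 return d[len(p) :].strip()
--         return d
--
--     if built:
--         sections.append("### Yang Saya Kerjakan")
--         for it in built:
--             desc = _clean_desc(str(it.get("description") or ""))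
--             if desc:
--                 sections.append(f"- Saya {desc}")
--         sections.append("")
--
--     if improved:
--         sections.append("### Yang Saya Tingkatkan")
--         for it in improved:
--             desc = _clean_desc(str(it.get("description") or ""))
--             if desc:
--                 sections.append(f"- Saya {desc}")
--         sections.append("")
--
--     if safeguards:
--         sections.append("### Safeguard & Quality")
--         for it in safeguards:
--             desc = _clean_desc(str(it.get("description") or ""))
--             if desc:
--                 sections.append(f"- Saya {desc}")
--         sections.append("")
--
--     if not built and not improved and not safeguards:
--         sections.append("No development activity found in selected range.")
--
--     return "\n".join(sections).strip()
-- ===== SOURCE B (Python) =====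
-- from typing import Any
--
-- def _build_non_ai_standup(agg: dict[str, Any]) -> str:
--     items = agg.get("detailed_changes") or []
--     if not isinstance(items, list):
--         items = []
--     dicts = [it for it in items if isinstance(it, dict)]
--
--     def _type_of(it: dict[str, Any]) -> str:
--         return str(it.get("type") or "chore")
--
--     def _clean_desc(desc: str) -> str:
--         d = desc.strip()
--         low = d.lower()
--         prefixes = ["feat:", "fix:", "refactor:", "test:", "chore:", "perf:", "ci:"]
--         for p in prefixes:
--             if low.startswith(p):
--                 return d[len(p):].strip()
--         return d
--
--     specs = [
--         ("### Yang Saya Kerjakan", ["feature", "infra"]),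
--         ("### Yang Saya Tingkatkan", ["refactor", "performance"]),
--         ("### Safeguard & Quality", ["validation", "test", "fix"]),
--     ]
--     sections: list[str] = []
--     for heading, types in specs:
--         group = [it for t in types for it in dicts if _type_of(it) == t][:6]
--         if group:
--             sections.append(heading)
--             for it in group:
--                 desc = _clean_desc(str(it.get("description") or ""))
--                 if desc:
--                     sections.append(f"- Saya {desc}")
--             sections.append("")
--     if not sections:
--         sections.append("No development activity found in selected range.")
--     return "\n".join(sections).strip()
-- ===== Notes on version B (the rewrite author's own statement) =====
-- stated objective: simpler
-- what changed: Drops the by_type grouping dict and the _take helper: B filters the item list directly per requested type (concatenated in type order, sliced to 6) and renders the three sections with one loop over (heading, types) specs instead of three copied blocks.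
import Mathlib
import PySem

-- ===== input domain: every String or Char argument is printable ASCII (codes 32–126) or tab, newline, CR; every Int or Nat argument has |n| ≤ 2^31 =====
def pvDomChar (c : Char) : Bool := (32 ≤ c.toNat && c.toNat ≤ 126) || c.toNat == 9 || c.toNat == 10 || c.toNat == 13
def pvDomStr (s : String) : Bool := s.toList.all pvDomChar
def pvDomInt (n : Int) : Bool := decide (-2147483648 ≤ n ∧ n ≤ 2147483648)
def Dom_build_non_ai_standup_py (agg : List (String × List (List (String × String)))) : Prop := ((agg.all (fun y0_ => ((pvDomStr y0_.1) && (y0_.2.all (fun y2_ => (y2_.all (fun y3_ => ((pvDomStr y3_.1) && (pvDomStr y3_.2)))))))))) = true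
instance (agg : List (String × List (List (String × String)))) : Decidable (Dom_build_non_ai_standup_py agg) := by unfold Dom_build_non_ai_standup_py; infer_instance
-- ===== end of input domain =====

-- B drops the by_type grouping dict: it filters the item list per requested type and renders
-- the three sections with one loop over (heading, types) specs — simpler, same cost.

-- shared helpers: both Pythons contain this identical code
-- str(it.get("type") or "chore")  ('or' on a str: empty string is falsy)
def pvTypeOf (it : List (String × String)) : String :=
  match (PySem.Dict.mk it).get? "type" with
  | none => "chore"
  | some s => if s = "" then "chore" else s

-- str(it.get("description") or "")  ('' when the key is absent or empty — both give "")
def pvDescOf (it : List (String × String)) : String :=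
  ((PySem.Dict.mk it).get? "description").getD ""

-- _clean_desc: strip, then first matching prefix (by lowercase) is cut off and the rest stripped
def pvCleanLoop (d low : String) : List String → String
  | [] => d
  | p :: ps =>
    if PySem.Str.startswith low p then
      PySem.Str.strip (PySem.Str.slice d (some (PySem.Str.len p)) none)
    else pvCleanLoop d low ps

def pvCleanDesc (desc : String) : String :=
  let d := PySem.Str.strip desc
  let low := PySem.Str.lower d
  pvCleanLoop d low ["feat:", "fix:", "refactor:", "test:", "chore:", "perf:", "ci:"]

-- items = agg.get("detailed_changes") or []   ('or []': None and [] both give [])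
def pvItems (agg : List (String × List (List (String × String)))) : List (List (String × String)) :=
  match (PySem.Dict.mk agg).get? "detailed_changes" with
  | none => []
  | some l => if l = [] then [] else l

-- ===== PORT A =====
-- (the 'isinstance' guards are vacuous under the declared types and are dropped in both ports;
--  out[:6] on a list is List.take 6 since 6 ≥ 0)
def build_non_ai_standup_py (agg : List (String × List (List (String × String)))) : String :=
  let items := pvItems agg
  let by_type := items.foldl (fun d it => d.modify (pvTypeOf it) [] (· ++ [it])) PySem.Dict.empty
  let take := fun (types : List String) (limit : Nat) =>
    (types.foldl (fun out t => out ++ by_type.getD t []) []).take limit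
  let built := take ["feature", "infra"] 6
  let improved := take ["refactor", "performance"] 6
  let safeguards := take ["validation", "test", "fix"] 6
  let sections : List String := []
  let sections :=
    if built.isEmpty then sections else
      (built.foldl (fun acc it =>
        let desc := pvCleanDesc (pvDescOf it)
        if desc = "" then acc else acc ++ ["- Saya " ++ desc])
        (sections ++ ["### Yang Saya Kerjakan"])) ++ [""]
  let sections :=
    if improved.isEmpty then sections else
      (improved.foldl (fun acc it =>
        let desc := pvCleanDesc (pvDescOf it)
        if desc = "" then acc else acc ++ ["- Saya " ++ desc])
        (sections ++ ["### Yang Saya Tingkatkan"])) ++ [""]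
  let sections :=
    if safeguards.isEmpty then sections else
      (safeguards.foldl (fun acc it =>
        let desc := pvCleanDesc (pvDescOf it)
        if desc = "" then acc else acc ++ ["- Saya " ++ desc])
        (sections ++ ["### Safeguard & Quality"])) ++ [""]
  let sections :=
    if built.isEmpty && improved.isEmpty && safeguards.isEmpty then
      sections ++ ["No development activity found in selected range."]
    else sections
  PySem.Str.strip (PySem.Str.join "\n" sections)

-- ===== PORT B =====
def build_non_ai_standup_py_alt (agg : List (String × List (List (String × String)))) : String :=
  let items := pvItems agg
  let group := fun (types : List String) =>
    (types.flatMap (fun t => items.filter (fun it => pvTypeOf it == t))).take 6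
  let specs : List (String × List String) :=
    [("### Yang Saya Kerjakan", ["feature", "infra"]),
     ("### Yang Saya Tingkatkan", ["refactor", "performance"]),
     ("### Safeguard & Quality", ["validation", "test", "fix"])]
  let sections := specs.foldl (fun acc sp =>
      let g := group sp.2
      if g.isEmpty then acc else
        acc ++ [sp.1] ++ g.filterMap (fun it =>
          let desc := pvCleanDesc (pvDescOf it)
          if desc = "" then none else some ("- Saya " ++ desc)) ++ [""]) []
  let sections :=
    if sections.isEmpty then ["No development activity found in selected range."] else sections
  PySem.Str.strip (PySem.Str.join "\n" sections)

-- ===== PRECONDITION & SPEC =====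
def Spec_build_non_ai_standup_py (agg : List (String × List (List (String × String)))) (out : String) : Prop := out = build_non_ai_standup_py_alt agg
instance (agg : List (String × List (List (String × String)))) (out : String) : Decidable (Spec_build_non_ai_standup_py agg out) := by unfold Spec_build_non_ai_standup_py; infer_instance

-- ===== CLAIM (what is proved, stated in full; the proofs are below) =====
def Claim_equal_build_non_ai_standup_py : Prop := ∀ (agg : List (String × List (List (String × String)))), Dom_build_non_ai_standup_py agg → Spec_build_non_ai_standup_py agg (build_non_ai_standup_py agg)

-- ===== LEMMAS AND PROOFS =====

-- A's grouping dict, looked up at t, is the direct filter B performs (invariant of A's loop)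
theorem pv_bytype_aux (l : List (List (String × String)))
    (d : PySem.Dict String (List (List (String × String)))) (t : String) :
    (l.foldl (fun d it => d.modify (pvTypeOf it) [] (· ++ [it])) d).getD t []
      = d.getD t [] ++ l.filter (fun it => pvTypeOf it == t) := by
  induction l generalizing d with
  | nil => simp
  | cons x xs ih =>
    by_cases h : pvTypeOf x = t
    · simp [ih, h]
    · have h' : t ≠ pvTypeOf x := fun hh => h hh.symm
      simp [ih, PySem.Dict.getD_modify, h, h']

theorem pv_bytype_getD (items : List (List (String × String))) (t : String) :
    (items.foldl (fun d it => d.modify (pvTypeOf it) [] (· ++ [it])) PySem.Dict.empty).getD t []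
      = items.filter (fun it => pvTypeOf it == t) := by
  simp [pv_bytype_aux]

-- A's inner rendering loop is B's filterMap
theorem pv_lines_eq (l : List (List (String × String))) (init : List String) :
    l.foldl (fun acc it =>
        let desc := pvCleanDesc (pvDescOf it)
        if desc = "" then acc else acc ++ ["- Saya " ++ desc]) init
      = init ++ l.filterMap (fun it =>
          let desc := pvCleanDesc (pvDescOf it)
          if desc = "" then none else some ("- Saya " ++ desc)) := by
  induction l generalizing init with
  | nil => simp
  | cons x xs ih => by_cases h : pvCleanDesc (pvDescOf x) = "" <;> simp [h, ih]

-- ===== VERDICT (by name: the statement is the Claim_ definition above) =====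
set_option maxHeartbeats 2000000 in
theorem build_non_ai_standup_py_spec : Claim_equal_build_non_ai_standup_py := by
  intro agg _
  show build_non_ai_standup_py agg = build_non_ai_standup_py_alt agg
  unfold build_non_ai_standup_py build_non_ai_standup_py_alt
  simp only [pv_bytype_getD, pv_lines_eq, List.foldl_cons, List.foldl_nil,
    List.flatMap_cons, List.flatMap_nil, List.nil_append, List.append_nil]
  split_ifs <;> simp_all
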